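-- pv_equiv track=rewrite | github.com/irumdev/coding-test-challenge | kakao-blind-2018/secret-map/secret-map.py | process
-- ===== SOURCE A (Python) =====
-- def process(row, n):
--     result = list()
--
--     for i in range(n):
--         if row[0][i] == '1':
--             result.append('#')
--         elif row[1][i] == '1':
--             result.append('#')
--         else:
--             result.append(' ')
--
--     return ''.join(result)
-- ===== SOURCE B (Python) =====
-- def process(row, n):
--     ones = set()
--     for s in row[:2]:
--         for i, c in enumerate(s[:n]):
--             if c == '1':
--                 ones.add(i)
--     return ''.join('#' if i in ones else ' ' for i in range(n))
-- ===== Notes on version B (the rewrite author's own statement) =====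
-- stated objective: alternative
-- what changed: Replaces A's per-index branch loop that appends to a result list with a set of '1'-positions collected from the first two rows once, then a single rendering pass over range(n) by set membership.
import Mathlib
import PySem

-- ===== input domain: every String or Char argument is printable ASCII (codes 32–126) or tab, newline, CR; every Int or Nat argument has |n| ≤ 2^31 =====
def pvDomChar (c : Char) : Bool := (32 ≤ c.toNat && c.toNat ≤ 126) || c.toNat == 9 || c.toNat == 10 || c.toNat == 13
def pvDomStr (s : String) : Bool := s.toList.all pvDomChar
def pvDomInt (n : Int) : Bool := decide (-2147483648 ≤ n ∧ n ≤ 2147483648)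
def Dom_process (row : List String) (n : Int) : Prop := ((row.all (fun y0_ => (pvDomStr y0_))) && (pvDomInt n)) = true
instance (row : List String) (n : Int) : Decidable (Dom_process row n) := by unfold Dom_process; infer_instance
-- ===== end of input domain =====

-- B replaces A's per-index branch loop with a set of '1'-positions built from the first two rows, then one rendering pass (alternative decomposition, same cost).


-- ===== PORT A =====
-- row[0][i] / row[1][i] ported as pyGetD on the character list (exact under Pre_process,
-- which puts every index A actually reads in range); the three-way branch appends one
-- 1-char string per i, joined at the end as in A.
def process (row : List String) (n : Int) : String :=
  let result := (PySem.List.pyRange 0 n 1).foldl (fun result i =>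
    result ++ [if PySem.List.pyGetD (PySem.List.pyGetD row 0 "").toList i ' ' == '1' then "#"
               else if PySem.List.pyGetD (PySem.List.pyGetD row 1 "").toList i ' ' == '1' then "#"
               else " "]) ([] : List String)
  PySem.Str.join "" result

-- ===== PORT B =====
-- helper: Source B's 'ones' set — the '1'-positions of row[:2], each row sliced to [:n]
def pvOnes (row : List String) (n : Int) : PySem.Set Int :=
  (PySem.List.slice row none (some 2)).foldl (fun s str =>
    (PySem.List.enumerate (PySem.List.slice str.toList none (some n)) 0).foldl
      (fun s p => if p.2 == '1' then PySem.Set.add s p.1 else s) s)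
    PySem.Set.empty

-- transliteration of Source B: build the set, then render range(n) by membership
def process_alt (row : List String) (n : Int) : String :=
  PySem.Str.join "" ((PySem.List.pyRange 0 n 1).map
    (fun i => if PySem.Set.contains (pvOnes row n) i then "#" else " "))

-- ===== PRECONDITION & SPEC =====
-- Exactly the inputs on which A returns: every i in range(n) must be a valid index into row[0]
-- (so row nonempty), and where row[0][i] ≠ '1' also a valid index into row[1] (so len(row) ≥ 2);
-- on all other inputs A raises IndexError.
def Pre_process (row : List String) (n : Int) : Prop :=
  (0 < n → row ≠ [] ∧ n ≤ ((row.headD "").toList.length : Int)) ∧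
  ∀ p ∈ ((row.headD "").toList.take n.toNat).zipIdx,
    (p.1 = '1' ∨ (1 < row.length ∧ p.2 < (row.getD 1 "").toList.length))
instance (row : List String) (n : Int) : Decidable (Pre_process row n) := by
  unfold Pre_process; infer_instance
def pvWitness_process : List String × Int := (["1010", "0110"], 4)

def Spec_process (row : List String) (n : Int) (out : String) : Prop := out = process_alt row n
instance (row : List String) (n : Int) (out : String) : Decidable (Spec_process row n out) := by
  unfold Spec_process; infer_instance

-- ===== CLAIM (what is proved, stated in full; the proofs are below) =====
def Claim_equal_process : Prop := ∀ (row : List String) (n : Int), Dom_process row n → Pre_process row n → Spec_process row n (process row n)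

-- ===== LEMMAS AND PROOFS =====

-- membership in B's inner accumulation loop
theorem mem_ones_inner (l : List (Int × Char)) (s : PySem.Set Int) (i : Int) :
    i ∈ l.foldl (fun s p => if p.2 == '1' then PySem.Set.add s p.1 else s) s ↔
      i ∈ s ∨ (i, '1') ∈ l := by
  induction l generalizing s with
  | nil => simp
  | cons p t ih =>
    obtain ⟨a, c⟩ := p
    rw [List.foldl_cons]
    by_cases hc : c = '1'
    · subst hc
      rw [if_pos (by simp), ih, PySem.Set.mem_add]
      simp only [List.mem_cons, Prod.mk.injEq]
      tauto
    · rw [if_neg (by simpa using hc), ih]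
      simp only [List.mem_cons, Prod.mk.injEq]
      constructor
      · tauto
      · rintro (h | ⟨_, h⟩ | h) <;> tauto

-- membership in B's outer loop over the rows
theorem mem_ones_outer (ls : List String) (n : Int) (s0 : PySem.Set Int) (i : Int) :
    i ∈ ls.foldl (fun s str =>
        (PySem.List.enumerate (PySem.List.slice str.toList none (some n)) 0).foldl
          (fun s p => if p.2 == '1' then PySem.Set.add s p.1 else s) s) s0 ↔
      i ∈ s0 ∨ ∃ str ∈ ls,
        (i, '1') ∈ PySem.List.enumerate (PySem.List.slice str.toList none (some n)) 0 := by
  induction ls generalizing s0 with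
  | nil => simp
  | cons a t ih =>
    rw [List.foldl_cons, ih, mem_ones_inner]
    simp only [List.mem_cons]
    constructor
    · rintro (( h | h) | ⟨str, hm, h⟩) <;> [tauto; exact Or.inr ⟨a, Or.inl rfl, h⟩; exact Or.inr ⟨str, Or.inr hm, h⟩]
    · rintro (h | ⟨str, (rfl | hm), h⟩) <;> tauto

-- (i, '1') occurs in enumerate(cs[:n]) iff i is an in-range '1'-position below n
theorem mem_enum_slice (cs : List Char) (n i : Int) (hn : 0 ≤ n) :
    (i, '1') ∈ PySem.List.enumerate (PySem.List.slice cs none (some n)) 0 ↔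
      0 ≤ i ∧ i < n ∧ i.toNat < cs.length ∧ cs.getD i.toNat ' ' = '1' := by
  rw [PySem.List.slice_to cs hn, PySem.List.mem_enumerate_iff]
  constructor
  · rintro ⟨k, hk, hp⟩
    simp only [List.length_take, lt_min_iff] at hk
    simp only [Prod.mk.injEq, zero_add] at hp
    obtain ⟨rfl, h1⟩ := hp
    refine ⟨by positivity, by omega, by simpa using hk.2, ?_⟩
    rw [List.getD_eq_getElem _ _ (by simpa using hk.2)]
    simpa [List.getElem_take] using h1.symm
  · rintro ⟨h0, h1, h2, h3⟩
    refine ⟨i.toNat, by simp; omega, ?_⟩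
    simp only [Prod.mk.injEq, zero_add]
    refine ⟨by omega, ?_⟩
    rw [List.getD_eq_getElem _ _ h2] at h3
    simp [List.getElem_take, h3]

-- A's loop, rewritten as a map (the body appends one element per index)
theorem process_eq_join_map (row : List String) (n : Int) :
    process row n = PySem.Str.join ""
      ((PySem.List.pyRange 0 n 1).map (fun i =>
        if PySem.List.pyGetD (PySem.List.pyGetD row 0 "").toList i ' ' == '1' then "#"
        else if PySem.List.pyGetD (PySem.List.pyGetD row 1 "").toList i ' ' == '1' then "#"
        else " ")) := by
  unfold process
  rw [PySem.List.foldl_append_singleton_eq_map]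
  simp

-- an index whose getD-read is '1' is in range (getD would default to ' ')
theorem getD_one_lt (l : List Char) (k : Nat) (h : l.getD k ' ' = '1') : k < l.length := by
  by_contra hh
  rw [List.getD_eq_default _ _ (by omega)] at h
  exact (by decide : (' ' : Char) ≠ '1') h

-- membership in B's set, characterised by the two rows' characters (for 0 ≤ i < n, row ≠ [])
theorem contains_pvOnes (row : List String) (n i : Int) (hi0 : 0 ≤ i) (hin : i < n)
    (hne : row ≠ []) (hlen0 : i.toNat < (row.headD "").toList.length) :
    PySem.Set.contains (pvOnes row n) i = true ↔
      ((row.headD "").toList.getD i.toNat ' ' = '1' ∨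
        (1 < row.length ∧ (row.getD 1 "").toList.getD i.toNat ' ' = '1')) := by
  have hn : 0 ≤ n := by omega
  rw [show PySem.Set.contains (pvOnes row n) i = List.contains (pvOnes row n) i from rfl,
      List.contains_iff_mem]
  unfold pvOnes
  rw [PySem.List.slice_to row (by norm_num), mem_ones_outer]
  simp only [PySem.Set.empty, List.not_mem_nil, false_or]
  match row with
  | [] => exact absurd rfl hne
  | [a] =>
    rw [show List.take (2 : Int).toNat [a] = [a] from rfl]
    simp only [List.mem_singleton, exists_eq_left]
    rw [mem_enum_slice a.toList n i hn]
    constructor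
    · rintro ⟨_, _, _, h⟩
      exact Or.inl h
    · rintro (h | ⟨h1, _⟩)
      · exact ⟨hi0, hin, hlen0, h⟩
      · simp at h1
  | a :: b :: rest =>
    rw [show List.take (2 : Int).toNat (a :: b :: rest) = [a, b] from rfl]
    simp only [List.mem_cons, List.not_mem_nil, or_false]
    constructor
    · rintro ⟨str, (rfl | rfl), hm⟩
      · exact Or.inl ((mem_enum_slice _ n i hn).mp hm).2.2.2
      · exact Or.inr ⟨by simp only [List.length_cons]; omega,
          ((mem_enum_slice _ n i hn).mp hm).2.2.2⟩
    · rintro (h | ⟨_, h⟩)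
      · exact ⟨a, Or.inl rfl, (mem_enum_slice _ n i hn).mpr ⟨hi0, hin, hlen0, h⟩⟩
      · exact ⟨b, Or.inr rfl, (mem_enum_slice _ n i hn).mpr ⟨hi0, hin, getD_one_lt _ _ h, h⟩⟩

-- ===== VERDICT (by name: the statement is the Claim_ definition above) =====
theorem process_spec : Claim_equal_process := by
  intro row n _ hpre
  unfold Spec_process
  rw [process_eq_join_map]
  unfold process_alt
  congr 1
  apply List.map_eq_map_iff.mpr
  intro i hi
  rw [PySem.List.mem_pyRange_one] at hi
  obtain ⟨hi0, hin⟩ := hi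
  obtain ⟨hcond, hall⟩ := hpre
  obtain ⟨hne, hlen0'⟩ := hcond (by omega)
  have hlen0 : i.toNat < (row.headD "").toList.length := by omega
  have hor : (row.headD "").toList.getD i.toNat ' ' = '1' ∨
      (1 < row.length ∧ i.toNat < (row.getD 1 "").toList.length) := by
    refine hall ((row.headD "").toList.getD i.toNat ' ', i.toNat) ?_
    rw [List.getD_eq_getElem _ _ hlen0]
    refine List.mk_mem_zipIdx_iff_getElem?.mpr ?_
    rw [List.getElem?_take_of_lt (by omega)]
    exact List.getElem?_eq_getElem hlen0
  have hd0 : PySem.List.pyGetD row 0 "" = row.headD "" := by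
    rw [PySem.List.pyGetD_zero]; cases row <;> rfl
  have hd1 : PySem.List.pyGetD row 1 "" = row.getD 1 "" := PySem.List.pyGetD_ofNat' row 1 ""
  rw [hd0, hd1, PySem.List.pyGetD_of_nonneg _ _ hi0, PySem.List.pyGetD_of_nonneg _ _ hi0]
  have hcont := contains_pvOnes row n i hi0 hin hne hlen0
  by_cases h0 : (row.headD "").toList.getD i.toNat ' ' = '1'
  · rw [if_pos (by simp only [beq_iff_eq]; exact h0), if_pos (hcont.mpr (Or.inl h0))]
  · rw [if_neg (by simp only [beq_iff_eq]; exact h0)]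
    by_cases h1 : (row.getD 1 "").toList.getD i.toNat ' ' = '1'
    · have hlt : 1 < row.length := (hor.resolve_left h0).1
      rw [if_pos (by simp only [beq_iff_eq]; exact h1), if_pos (hcont.mpr (Or.inr ⟨hlt, h1⟩))]
    · rw [if_neg (by simp only [beq_iff_eq]; exact h1),
        if_neg (fun hc => by rcases hcont.mp hc with h | ⟨_, h⟩ <;> [exact h0 h; exact h1 h])]
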